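-- pv_equiv track=rewrite | github.com/devra-ai/devra_demos | wip/tab_to_midi.py | parse_tab
-- ===== SOURCE A (Python) =====
-- string_notes = {'E|': 40, 'A|': 45, 'D|': 50, 'G|': 55, 'B|': 59, 'e|': 64}
--
-- def parse_tab(tab_str):
--     lines = tab_str.split('\n')
--     notes_at_positions = {}
--     for line in lines:
--         if line[:2] in string_notes:
--             for i, char in enumerate(line[2:]):
--                 if char.isdigit():
--                     note = string_notes[line[:2]] + int(char)
--                     if i not in notes_at_positions:
--                         notes_at_positions[i] = []
--                     notes_at_positions[i].append(note)
--     return notes_at_positions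
-- ===== SOURCE B (Python) =====
-- string_notes = {'E|': 40, 'A|': 45, 'D|': 50, 'G|': 55, 'B|': 59, 'e|': 64}
--
-- def parse_tab(tab_str):
--     # flatten to a row-major (position, note) event list, then group by position
--     rows = [(string_notes[line[:2]], line[2:])
--             for line in tab_str.split('\n') if line[:2] in string_notes]
--     events = [(i, base + int(ch))
--               for base, body in rows
--               for i, ch in enumerate(body) if ch.isdigit()]
--     return {i: [n for j, n in events if j == i]
--             for i in dict.fromkeys(j for j, _ in events)}
-- ===== Notes on version B (the rewrite author's own statement) =====
-- stated objective: alternative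
-- what changed: Replaces A's incremental mutation of a dict of lists inside the nested scan by a flatten-then-group-by pipeline: extract the qualifying (base, body) rows, flatten them into one row-major (position, note) event list, and build the result by pairing the deduplicated positions with a filter over the events.
import Mathlib
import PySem

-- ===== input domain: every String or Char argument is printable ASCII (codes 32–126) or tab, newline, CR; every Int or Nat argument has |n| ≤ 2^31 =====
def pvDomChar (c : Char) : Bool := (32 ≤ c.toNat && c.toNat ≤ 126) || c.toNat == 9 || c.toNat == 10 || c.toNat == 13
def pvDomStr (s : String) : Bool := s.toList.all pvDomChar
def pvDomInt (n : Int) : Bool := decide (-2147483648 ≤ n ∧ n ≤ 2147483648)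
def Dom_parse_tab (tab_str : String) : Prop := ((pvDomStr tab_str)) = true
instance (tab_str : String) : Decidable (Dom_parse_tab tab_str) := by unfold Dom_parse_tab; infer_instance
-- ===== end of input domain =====

-- B replaces A's incremental dict-of-lists mutation by a flatten-then-group-by pipeline (objective: alternative).

-- the module-level dict string_notes, shared context of both programs (keys as List Char)
def pvStringNotes : PySem.Dict (List Char) Int :=
  PySem.Dict.ofList [("E|".toList, 40), ("A|".toList, 45), ("D|".toList, 50),
                     ("G|".toList, 55), ("B|".toList, 59), ("e|".toList, 64)]

-- int(ch) for one character; both Pythons call int(char) only under an isdigit guard,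
-- where int never raises on the ASCII domain, so the .getD 0 branch is never taken there
def pvIntChar (c : Char) : Int := (PySem.Int.ofChars? [c]).getD 0

-- ===== PORT A =====
-- literal transliteration: split('\n'); per line, if line[:2] in string_notes, for i,char in
-- enumerate(line[2:]): if char.isdigit(): create key i with [] if absent, then append;
-- d[i].append(note) on the then-present key i is Dict.modify i [] (· ++ [note]).
def parse_tab (tab_str : String) : List (Int × List Int) :=
  let lines := PySem.Chars.splitOn tab_str.toList ['\n']
  let d := lines.foldl (fun d line =>
    if pvStringNotes.contains (PySem.List.slice line none (some 2)) then
      (PySem.List.enumerate (PySem.List.slice line (some 2) none)).foldl (fun d ic =>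
        if PySem.Chars.isdigit ic.2 then
          (if d.contains ic.1 then d else d.insert ic.1 ([] : List Int)).modify ic.1 []
            (fun l => l ++ [pvStringNotes.getD (PySem.List.slice line none (some 2)) 0 + pvIntChar ic.2])
        else d) d
    else d) PySem.Dict.empty
  d.items

-- ===== PORT B =====
-- transliteration of Source B: qualifying rows (base, body); flat event list (position, note)
-- in row-major order; result = position-dedup paired with the filtered notes per position.
def parse_tab_alt (tab_str : String) : List (Int × List Int) :=
  let rows := ((PySem.Chars.splitOn tab_str.toList ['\n']).filter
      (fun line => pvStringNotes.contains (PySem.List.slice line none (some 2)))).map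
      (fun line => (pvStringNotes.getD (PySem.List.slice line none (some 2)) 0,
                    PySem.List.slice line (some 2) none))
  let events := rows.flatMap (fun r =>
      ((PySem.List.enumerate r.2).filter (fun ic => PySem.Chars.isdigit ic.2)).map
      (fun ic => (ic.1, r.1 + pvIntChar ic.2)))
  (PySem.List.dedup (events.map (fun p => p.1))).map
      (fun i => (i, (events.filter (fun p => p.1 == i)).map (fun p => p.2)))

-- ===== PRECONDITION & SPEC =====
def Spec_parse_tab (tab_str : String) (out : List (Int × List Int)) : Prop := out = parse_tab_alt tab_str
instance (tab_str : String) (out : List (Int × List Int)) : Decidable (Spec_parse_tab tab_str out) := by unfold Spec_parse_tab; infer_instance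

-- ===== CLAIM (what is proved, stated in full; the proofs are below) =====
def Claim_equal_parse_tab : Prop := ∀ (tab_str : String), Dom_parse_tab tab_str → Spec_parse_tab tab_str (parse_tab tab_str)

-- ===== LEMMAS AND PROOFS =====

-- one grouping step: appending p.2 to the bucket of key p.1
def pvStep (d : PySem.Dict Int (List Int)) (p : Int × Int) : PySem.Dict Int (List Int) :=
  d.modify p.1 [] (fun t => t ++ [p.2])

-- the (position, note) events of one qualifying line
def pvEvs (base : Int) (body : List Char) : List (Int × Int) :=
  ((PySem.List.enumerate body).filter (fun ic => PySem.Chars.isdigit ic.2)).map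
    (fun ic => (ic.1, base + pvIntChar ic.2))

-- A's create-if-absent-then-append equals one modify-with-default-[] update
theorem pv_step_eq (d : PySem.Dict Int (List Int)) (i : Int) (note : Int) :
    (if d.contains i then d else d.insert i ([] : List Int)).modify i []
      (fun l => l ++ [note]) = d.modify i [] (fun l => l ++ [note]) := by
  by_cases h : d.contains i = true
  · rw [if_pos h]
  · rw [if_neg h]
    simp only [PySem.Dict.modify, PySem.Dict.getD_insert_self, PySem.Dict.insert_insert_self]
    simp [PySem.Dict.getD_of_not_contains, h]

-- A's inner loop over one line's body equals folding pvStep over that line's events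
theorem pv_line_eq (base : Int) (l : List (Int × Char)) (d : PySem.Dict Int (List Int)) :
    l.foldl (fun d ic =>
      if PySem.Chars.isdigit ic.2 then
        (if d.contains ic.1 then d else d.insert ic.1 ([] : List Int)).modify ic.1 []
          (fun t => t ++ [base + pvIntChar ic.2])
      else d) d
    = (((l.filter (fun ic => PySem.Chars.isdigit ic.2)).map
        (fun ic => (ic.1, base + pvIntChar ic.2)))).foldl pvStep d := by
  rw [List.foldl_map, ← PySem.List.foldl_if_eq_foldl_filter]
  apply PySem.List.foldl_congr_mem
  intro acc x _
  by_cases h : PySem.Chars.isdigit x.2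
  · simp only [h, if_true, pvStep, pv_step_eq]
  · simp [h]

-- A's whole loop nest equals folding pvStep over the flattened row-major event list
theorem pv_outer_eq (lines : List (List Char)) (d : PySem.Dict Int (List Int)) :
    lines.foldl (fun d line =>
      if pvStringNotes.contains (PySem.List.slice line none (some 2)) then
        (PySem.List.enumerate (PySem.List.slice line (some 2) none)).foldl (fun d ic =>
          if PySem.Chars.isdigit ic.2 then
            (if d.contains ic.1 then d else d.insert ic.1 ([] : List Int)).modify ic.1 []
              (fun l => l ++ [pvStringNotes.getD (PySem.List.slice line none (some 2)) 0 + pvIntChar ic.2])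
          else d) d
      else d) d
    = ((lines.filter (fun line => pvStringNotes.contains (PySem.List.slice line none (some 2)))).flatMap
        (fun line => pvEvs (pvStringNotes.getD (PySem.List.slice line none (some 2)) 0)
                           (PySem.List.slice line (some 2) none))).foldl pvStep d := by
  rw [List.foldl_flatMap, ← PySem.List.foldl_if_eq_foldl_filter]
  apply PySem.List.foldl_congr_mem
  intro acc x _
  by_cases h : pvStringNotes.contains (PySem.List.slice x none (some 2)) = true
  · simp only [h, if_true, pv_line_eq, pvEvs]
  · simp [h]

-- the items of the grouping fold are the deduped keys paired with the filtered values
theorem pv_group (events : List (Int × Int)) :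
    (events.foldl pvStep PySem.Dict.empty).items
    = (PySem.List.dedup (events.map (fun p => p.1))).map
        (fun i => (i, (events.filter (fun p => p.1 == i)).map (fun p => p.2))) := by
  have hstep : events.foldl pvStep PySem.Dict.empty
      = events.foldl (fun d p => d.modify p.1 [] (fun t => t ++ [p.2])) PySem.Dict.empty := rfl
  rw [hstep]
  have hnd : ((events.foldl (fun d p => d.modify p.1 [] (fun t => t ++ [p.2]))
      PySem.Dict.empty).keys).Nodup :=
    PySem.Dict.nodup_keys_foldl_modify_key events (fun p => p.1) []
      (fun _ p => fun t => t ++ [p.2]) PySem.Dict.empty PySem.Dict.nodup_keys_empty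
  rw [PySem.Dict.items_eq_map_keys _ hnd ([] : List Int),
      PySem.Dict.keys_foldl_modify_key events (fun p => p.1) []
        (fun _ p => fun t => t ++ [p.2]) PySem.Dict.empty]
  simp only [PySem.Dict.getD_foldl_modify_append, PySem.Dict.getD_empty, List.nil_append,
    PySem.Dict.keys_empty, PySem.List.dedup_eq_ofList, PySem.Set.ofList_eq_foldl, PySem.Set.update]

theorem parse_tab_eq (s : String) : parse_tab s = parse_tab_alt s := by
  simp only [parse_tab, parse_tab_alt]
  rw [pv_outer_eq, pv_group, List.flatMap_map]
  simp only [pvEvs]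

-- ===== VERDICT (by name: the statement is the Claim_ definition above) =====
theorem parse_tab_spec : Claim_equal_parse_tab := by
  intro s _
  unfold Spec_parse_tab
  exact parse_tab_eq s
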